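-- pv_equiv track=rewrite | github.com/boyLenGit/StudyPythonPC | Pylearn1/APIFu/LenDataProcess.py | helper_len_kernel_2d_cut
-- ===== SOURCE A (Python) =====
-- def helper_len_kernel_2d_cut(input1, size=256, step=224):
--     len_data = len(input1)
--     cnt = 0
--     list_fusion = []
--     while True:
--         if cnt * step + size > len_data:
--             list_fusion.append(input1[len_data - size: len_data])
--             break
--         list_fusion.append(input1[cnt * step: cnt * step + size])
--         if cnt * step + size == len_data: break
--         cnt += 1
--     return list_fusion
-- ===== SOURCE B (Python) =====
-- def helper_len_kernel_2d_cut(input1, size=256, step=224):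
--     tail = input1[len(input1) - size:]
--     def go(rest):
--         if len(rest) < size:
--             return [tail]
--         if len(rest) == size:
--             return [rest]
--         return [rest[:size]] + go(rest[step:])
--     return go(input1)
-- ===== Notes on version B (the rewrite author's own statement) =====
-- stated objective: alternative
-- what changed: B replaces A's unbounded while-loop with a counter and absolute index arithmetic by a recursion that consumes the list itself: it decides each case from the length of the remaining suffix, emits each window as a prefix of that suffix, recurses on the suffix with step elements dropped, and precomputes the end-aligned tail once. Pre_ excludes negative size, on which B's recursion never returns (RecursionError) while A returns degenerate empty windows, and non-positive step with size < len(input1), on which both programs loop forever.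
-- outside the precondition, e.g. on helper_len_kernel_2d_cut([1], -1, 2): A returns [[], []], B raises RecursionError
import Mathlib
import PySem

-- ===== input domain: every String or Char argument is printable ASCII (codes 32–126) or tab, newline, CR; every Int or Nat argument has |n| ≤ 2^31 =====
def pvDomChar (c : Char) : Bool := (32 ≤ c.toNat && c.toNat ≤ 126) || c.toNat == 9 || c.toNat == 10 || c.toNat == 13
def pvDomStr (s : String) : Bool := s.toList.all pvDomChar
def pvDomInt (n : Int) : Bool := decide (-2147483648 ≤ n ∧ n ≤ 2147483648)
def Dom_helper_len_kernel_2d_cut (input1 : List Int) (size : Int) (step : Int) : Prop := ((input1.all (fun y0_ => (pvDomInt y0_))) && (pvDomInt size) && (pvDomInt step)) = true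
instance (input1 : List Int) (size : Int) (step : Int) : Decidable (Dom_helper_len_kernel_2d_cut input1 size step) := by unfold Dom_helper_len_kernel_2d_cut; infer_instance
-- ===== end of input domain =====

-- B replaces A's while-loop with counter and absolute index arithmetic by a recursion that
-- consumes the list suffix itself (objective: alternative decomposition); RETURN value equality
-- proved for step ≥ 1 and size ≥ 0.

-- ===== PORT A =====
-- A's 'while True' loop; the fuel is an upper bound on its iteration count under Pre_
-- (step ≥ 1) and is never exhausted there (proved below).
def pvLoopA (input1 : List Int) (size step n : Int) : Nat → Int → List (List Int) → List (List Int)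
  | 0, _, acc => acc
  | fuel + 1, cnt, acc =>
    if cnt * step + size > n then
      acc ++ [PySem.List.slice input1 (some (n - size)) (some n)]
    else
      let acc2 := acc ++ [PySem.List.slice input1 (some (cnt * step)) (some (cnt * step + size))]
      if cnt * step + size = n then acc2
      else pvLoopA input1 size step n fuel (cnt + 1) acc2

def helper_len_kernel_2d_cut (input1 : List Int) (size : Int) (step : Int) : List (List Int) :=
  let len_data : Int := input1.length
  pvLoopA input1 size step len_data (input1.length + size.natAbs + 2) 0 []

-- ===== PORT B =====
-- B's inner recursion 'go'; the fuel bounds its depth (≤ len(input1)+1 under Pre_, proved below).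
def pvGoB (size step : Int) (tail : List Int) : Nat → List Int → List (List Int)
  | 0, _ => []
  | fuel + 1, rest =>
    if (rest.length : Int) < size then [tail]
    else if (rest.length : Int) = size then [rest]
    else PySem.List.slice rest none (some size)
           :: pvGoB size step tail fuel (PySem.List.slice rest (some step) none)

def helper_len_kernel_2d_cut_alt (input1 : List Int) (size : Int) (step : Int) : List (List Int) :=
  let tail := PySem.List.slice input1 (some ((input1.length : Int) - size)) none
  pvGoB size step tail (input1.length + 1) input1

-- ===== PRECONDITION & SPEC =====
-- Pre_ excludes negative size, on which B's recursion never returns (RecursionError) while A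
-- returns degenerate empty windows, and non-positive step with size < len(input1), on which
-- both A's loop and B's recursion run forever.
def Pre_helper_len_kernel_2d_cut (input1 : List Int) (size : Int) (step : Int) : Prop :=
  0 ≤ size ∧ (1 ≤ step ∨ (input1.length : Int) ≤ size)
instance (input1 : List Int) (size : Int) (step : Int) : Decidable (Pre_helper_len_kernel_2d_cut input1 size step) := by unfold Pre_helper_len_kernel_2d_cut; infer_instance

def pvWitness_helper_len_kernel_2d_cut : List Int × Int × Int := ([1, 2, 3, 4, 5], 2, 2)

def Spec_helper_len_kernel_2d_cut (input1 : List Int) (size : Int) (step : Int) (out : List (List Int)) : Prop := out = helper_len_kernel_2d_cut_alt input1 size step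
instance (input1 : List Int) (size : Int) (step : Int) (out : List (List Int)) : Decidable (Spec_helper_len_kernel_2d_cut input1 size step out) := by unfold Spec_helper_len_kernel_2d_cut; infer_instance

-- ===== CLAIM (what is proved, stated in full; the proofs are below) =====
def Claim_equal_helper_len_kernel_2d_cut : Prop := ∀ (input1 : List Int) (size : Int) (step : Int), Dom_helper_len_kernel_2d_cut input1 size step → Pre_helper_len_kernel_2d_cut input1 size step → Spec_helper_len_kernel_2d_cut input1 size step (helper_len_kernel_2d_cut input1 size step)

-- ===== LEMMAS AND PROOFS =====

-- a slice ending exactly at the list's length equals the open-ended slice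
theorem pv_slice_end_len (xs : List Int) (a : Int) :
    PySem.List.slice xs (some a) (some (xs.length : Int)) = PySem.List.slice xs (some a) none := by
  simp [PySem.List.slice, PySem.List.clampIdx]
  split_ifs <;> omega

-- the loop relation: A's loop from state (cnt, acc) equals acc ++ B's recursion on the
-- corresponding suffix of input1
theorem pv_rel (input1 : List Int) (size step : Int) (hsz : 0 ≤ size) (hst : 1 ≤ step) :
    ∀ (fB fA : Nat) (cnt : Int) (acc : List (List Int)),
      0 ≤ cnt →
      (input1.drop (cnt * step).toNat).length < fB →
      1 ≤ fA →
      (input1.length : Int) - size - cnt * step < ((fA : Int) - 1) * step →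
      pvLoopA input1 size step (input1.length : Int) fA cnt acc
        = acc ++ pvGoB size step
            (PySem.List.slice input1 (some ((input1.length : Int) - size)) none)
            fB (input1.drop (cnt * step).toNat) := by
  intro fB
  induction fB with
  | zero => intro fA cnt acc _ hlen _ _; omega
  | succ f ih =>
    intro fA cnt acc hcnt hlen hfA hfuel
    obtain ⟨fA', rfl⟩ : ∃ k, fA = k + 1 := ⟨fA - 1, by omega⟩
    have ho0 : 0 ≤ cnt * step := mul_nonneg hcnt (by omega)
    have hoN : (((cnt * step).toNat : Int)) = cnt * step := Int.toNat_of_nonneg ho0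
    have hL : (input1.drop (cnt * step).toNat).length = input1.length - (cnt * step).toNat :=
      List.length_drop
    by_cases h1 : cnt * step + size > (input1.length : Int)
    · -- A exits through the tail branch
      by_cases h2 : cnt * step ≤ (input1.length : Int) ∨ 0 < size
      · -- the suffix is shorter than size : B's first branch
        have hBlt : ((input1.drop (cnt * step).toNat).length : Int) < size := by
          rw [hL]; push_cast; omega
        simp only [pvLoopA, pvGoB]
        rw [if_pos h1, if_pos hBlt, pv_slice_end_len]
      · -- size = 0 and cnt*step past the end: both sides emit the empty window
        push_neg at h2
        obtain ⟨h2a, h2b⟩ := h2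
        have hsz0 : size = 0 := by omega
        have hLe : (input1.drop (cnt * step).toNat).length = 0 := by
          rw [hL]; omega
        have hBlt : ¬ ((input1.drop (cnt * step).toNat).length : Int) < size := by
          rw [hLe]; simp [hsz0]
        have hBeq : ((input1.drop (cnt * step).toNat).length : Int) = size := by
          rw [hLe]; simp [hsz0]
        have hdropnil : input1.drop (cnt * step).toNat = [] :=
          List.eq_nil_of_length_eq_zero hLe
        have htailA : PySem.List.slice input1 (some ((input1.length : Int) - size))
            (some (input1.length : Int)) = [] := by
          rw [hsz0, sub_zero]
          rw [PySem.List.slice_toNat input1 (by positivity) (by positivity)]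
          simp
        simp only [pvLoopA, pvGoB]
        rw [if_pos h1, if_neg hBlt, if_pos hBeq, htailA, hdropnil]
    · push_neg at h1
      have hLeq : ((input1.drop (cnt * step).toNat).length : Int)
          = (input1.length : Int) - cnt * step := by
        rw [hL]; push_cast; omega
      have hwin : PySem.List.slice input1 (some (cnt * step)) (some (cnt * step + size))
          = (input1.drop (cnt * step).toNat).take size.toNat := by
        rw [PySem.List.slice_toNat input1 ho0 (by omega)]
        congr 1
        omega
      by_cases h3 : cnt * step + size = (input1.length : Int)
      · -- A's exact-end break; B's length-equal branch
        have hBlt : ¬ ((input1.drop (cnt * step).toNat).length : Int) < size := by omega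
        have hBeq : ((input1.drop (cnt * step).toNat).length : Int) = size := by omega
        have htake : (input1.drop (cnt * step).toNat).take size.toNat
            = input1.drop (cnt * step).toNat := List.take_of_length_le (by omega)
        simp only [pvLoopA, pvGoB]
        rw [if_neg (not_lt.mpr h1), if_pos h3, if_neg hBlt, if_pos hBeq, hwin, htake]
      · -- both continue
        have hBlt : ¬ ((input1.drop (cnt * step).toNat).length : Int) < size := by omega
        have hBeq : ¬ ((input1.drop (cnt * step).toNat).length : Int) = size := by omega
        have hwB : PySem.List.slice (input1.drop (cnt * step).toNat) none (some size)
            = (input1.drop (cnt * step).toNat).take size.toNat := PySem.List.slice_to _ hsz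
        have e1 : (cnt + 1) * step = cnt * step + step := by ring
        have hrest : PySem.List.slice (input1.drop (cnt * step).toNat) (some step) none
            = input1.drop ((cnt + 1) * step).toNat := by
          rw [PySem.List.slice_from _ (by omega), List.drop_drop, e1]
          congr 1
          omega
        have hfA' : 1 ≤ fA' := by
          rcases Nat.eq_zero_or_pos fA' with h0 | h0
          · exfalso; subst h0; norm_num at hfuel; omega
          · exact h0
        have ihx := ih fA' (cnt + 1)
          (acc ++ [PySem.List.slice input1 (some (cnt * step)) (some (cnt * step + size))])
          (by omega)
          (by
            have hmono : ((cnt + 1) * step).toNat ≥ (cnt * step).toNat + 1 := by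
              rw [e1]; omega
            have hlen2 : (input1.drop ((cnt + 1) * step).toNat).length
                = input1.length - ((cnt + 1) * step).toNat := List.length_drop
            omega)
          hfA'
          (by
            have e2 : ((fA' : Int) + 1 - 1) * step = ((fA' : Int) - 1) * step + step := by ring
            push_cast at hfuel ⊢
            rw [e1]
            omega)
        simp only [pvLoopA, pvGoB]
        rw [if_neg (not_lt.mpr h1), if_neg h3, if_neg hBlt, if_neg hBeq, hwB, hrest, ihx, hwin]
        simp

-- step ≤ 0 but size ≥ len(input1): both sides stop in their first iteration
theorem pv_degenerate (input1 : List Int) (size step : Int) (hsz : 0 ≤ size)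
    (hns : (input1.length : Int) ≤ size) :
    helper_len_kernel_2d_cut input1 size step = helper_len_kernel_2d_cut_alt input1 size step := by
  have h2 : input1.length + size.natAbs + 2 = (input1.length + size.natAbs + 1) + 1 := rfl
  simp only [helper_len_kernel_2d_cut, helper_len_kernel_2d_cut_alt, h2, pvLoopA, pvGoB,
    zero_mul, zero_add, List.nil_append]
  rcases lt_or_eq_of_le hns with h | h
  · rw [if_pos h, if_pos h, pv_slice_end_len]
  · have c2 : ¬ ((input1.length : Int) < size) := by omega
    rw [if_neg c2, if_pos h.symm, if_neg c2, if_pos h]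
    have hfull : PySem.List.slice input1 (some 0) (some size) = input1 := by
      rw [PySem.List.slice_toNat input1 le_rfl hsz]
      simp only [Int.toNat_zero, List.drop_zero, Nat.sub_zero]
      exact List.take_of_length_le (by omega)
    rw [hfull]

-- ===== VERDICT (by name: the statement is the Claim_ definition above) =====
theorem helper_len_kernel_2d_cut_spec : Claim_equal_helper_len_kernel_2d_cut := by
  unfold Claim_equal_helper_len_kernel_2d_cut
  intro input1 size step _ hpre
  unfold Spec_helper_len_kernel_2d_cut
  obtain ⟨hsz, hst | hns⟩ := hpre
  case inr => exact pv_degenerate input1 size step hsz hns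
  have hfuel : (input1.length : Int) - size - 0 * step
      < (((input1.length + size.natAbs + 2 : Nat) : Int) - 1) * step := by
    have h2 : ((input1.length + size.natAbs + 2 : Nat) : Int) - 1
        = (input1.length : Int) + (size.natAbs : Int) + 1 := by push_cast; ring
    have h3 : (input1.length : Int) + (size.natAbs : Int) + 1
        ≤ ((input1.length : Int) + (size.natAbs : Int) + 1) * step :=
      le_mul_of_one_le_right (by positivity) hst
    rw [h2, zero_mul]
    omega
  have h := pv_rel input1 size step hsz hst (input1.length + 1)
    (input1.length + size.natAbs + 2) 0 [] le_rfl
    (by simp) (by omega) hfuel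
  simp only [helper_len_kernel_2d_cut, helper_len_kernel_2d_cut_alt]
  rw [h]
  simp
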